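-- pv_equiv track=rewrite | github.com/ozzymcg/ATTICUS_TERMINAL | mod/mcl_tuning.py | _edge_indices
-- ===== SOURCE A (Python) =====
-- from typing import Dict, List, Optional
--
-- def _edge_indices(frames: List[Dict], flag: int) -> List[int]:
--     """Handle edge indices."""
--     idx: List[int] = []
--     prev = False
--     for i, f in enumerate(frames):
--         cur = bool(int(f.get("event_flags", 0)) & flag)
--         if cur and not prev:
--             idx.append(i)
--         prev = cur
--     return idx
-- ===== SOURCE B (Python) =====
-- from typing import Dict, List
--
--
-- def _edge_indices(frames: List[Dict], flag: int) -> List[int]: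
--     """Handle edge indices: record the start of each run of set-flag frames, then skip the run."""
--     idx: List[int] = []
--     i, n = 0, len(frames)
--     while i < n:
--         if int(frames[i].get("event_flags", 0)) & flag:
--             idx.append(i)
--             while i < n and int(frames[i].get("event_flags", 0)) & flag:
--                 i += 1
--         else:
--             i += 1
--     return idx
-- ===== Notes on version B (the rewrite author's own statement) =====
-- stated objective: alternative
-- what changed: Replaces A's stateful edge-detecting pass (prev flag threaded through one loop) by a run-skipping index walk: an outer while finds the start of each run of set-flag frames, records it, and an inner while jumps over the whole run, so no previous-flag state exists at all.
import Mathlib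
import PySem

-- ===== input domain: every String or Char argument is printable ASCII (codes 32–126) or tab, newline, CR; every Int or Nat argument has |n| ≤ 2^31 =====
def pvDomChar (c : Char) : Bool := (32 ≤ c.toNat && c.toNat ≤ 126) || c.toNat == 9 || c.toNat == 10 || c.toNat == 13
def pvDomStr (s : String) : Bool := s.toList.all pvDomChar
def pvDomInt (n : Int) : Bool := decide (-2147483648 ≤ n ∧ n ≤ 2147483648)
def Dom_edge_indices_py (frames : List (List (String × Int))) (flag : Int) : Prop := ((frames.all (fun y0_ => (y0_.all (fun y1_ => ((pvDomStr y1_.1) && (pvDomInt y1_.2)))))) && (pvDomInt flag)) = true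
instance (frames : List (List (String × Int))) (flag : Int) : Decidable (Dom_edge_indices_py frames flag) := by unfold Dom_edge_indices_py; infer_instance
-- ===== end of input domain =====

-- B replaces A's stateful rising-edge pass by a run-skipping index walk (record each run start,
-- then skip the whole run); same O(n) cost, alternative algorithm. Return values proved equal.


-- ===== PORT A =====
-- A: single pass over enumerate(frames) threading (idx, prev) through the loop, appending i on a rising edge.
def edge_indices_py (frames : List (List (String × Int))) (flag : Int) : List Int :=
  ((PySem.List.enumerate frames 0).foldl
    (fun (st : List Int × Bool) (p : Int × List (String × Int)) =>
      let cur : Bool := decide (PySem.Int.band (PySem.Dict.getD (PySem.Dict.mk p.2) "event_flags" 0) flag ≠ 0)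
      (if cur && !st.2 then st.1 ++ [p.1] else st.1, cur))
    ([], false)).1

-- ===== PORT B =====
-- B: frame i has the flag set (truthiness of int & flag)
def pvCheck (flag : Int) (f : List (String × Int)) : Bool :=
  decide (PySem.Int.band (PySem.Dict.getD (PySem.Dict.mk f) "event_flags" 0) flag ≠ 0)

-- B's inner while: length of the leading run of set-flag frames
def pvSkip (flag : Int) : List (List (String × Int)) → Nat
  | [] => 0
  | f :: rest => if pvCheck flag f then 1 + pvSkip flag rest else 0

-- B's outer while at absolute index i: record the run start, skip the run; else advance by one
def pvWalk (flag : Int) (i : Int) : List (List (String × Int)) → List Int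
  | [] => []
  | f :: rest =>
    if pvCheck flag f then
      i :: pvWalk flag (i + 1 + (pvSkip flag rest : Int)) (rest.drop (pvSkip flag rest))
    else
      pvWalk flag (i + 1) rest
termination_by l => l.length
decreasing_by
  · have := List.length_drop (l := rest) (i := pvSkip flag rest)
    simp only [List.length_cons]; omega
  · simp

def edge_indices_py_alt (frames : List (List (String × Int))) (flag : Int) : List Int :=
  pvWalk flag 0 frames

-- ===== PRECONDITION & SPEC =====
def Spec_edge_indices_py (frames : List (List (String × Int))) (flag : Int) (out : List Int) : Prop := out = edge_indices_py_alt frames flag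
instance (frames : List (List (String × Int))) (flag : Int) (out : List Int) : Decidable (Spec_edge_indices_py frames flag out) := by unfold Spec_edge_indices_py; infer_instance

-- ===== CLAIM (what is proved, stated in full; the proofs are below) =====
def Claim_equal_edge_indices_py : Prop := ∀ (frames : List (List (String × Int))) (flag : Int), Dom_edge_indices_py frames flag → Spec_edge_indices_py frames flag (edge_indices_py frames flag)

-- ===== LEMMAS AND PROOFS =====

-- reference recursion: rising-edge indices of a flag list starting at index s with previous state prev
def edgeRef (s : Int) (prev : Bool) : List Bool → List Int
  | [] => []
  | c :: fs => (if c && !prev then [s] else []) ++ edgeRef (s + 1) c fs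

-- boolean-level copies of B's two loops
def skipB : List Bool → Nat
  | [] => 0
  | c :: fs => if c then 1 + skipB fs else 0

def walkB (i : Int) : List Bool → List Int
  | [] => []
  | c :: fs =>
    if c then i :: walkB (i + 1 + (skipB fs : Int)) (fs.drop (skipB fs))
    else walkB (i + 1) fs
termination_by l => l.length
decreasing_by
  · have := List.length_drop (l := fs) (i := skipB fs)
    simp only [List.length_cons]; omega
  · simp

-- the A-side fold equals acc ++ edgeRef over the flag table
theorem foldA_eq (flag : Int) (frames : List (List (String × Int))) :
    ∀ (s : Int) (acc : List Int) (prev : Bool),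
    ((PySem.List.enumerate frames s).foldl
      (fun (st : List Int × Bool) (p : Int × List (String × Int)) =>
        let cur : Bool := decide (PySem.Int.band (PySem.Dict.getD (PySem.Dict.mk p.2) "event_flags" 0) flag ≠ 0)
        (if cur && !st.2 then st.1 ++ [p.1] else st.1, cur))
      (acc, prev)).1
    = acc ++ edgeRef s prev (frames.map (pvCheck flag)) := by
  induction frames with
  | nil => intro s acc prev; simp [PySem.List.enumerate_nil, edgeRef]
  | cons f rest ih =>
    intro s acc prev
    rw [PySem.List.enumerate_cons]
    simp only [List.foldl_cons, List.map_cons]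
    rw [ih]
    cases hb : pvCheck flag f <;> cases prev <;>
      simp_all [edgeRef, pvCheck, List.append_assoc]

-- B's frame-level loops project to the boolean-level loops through the flag table
theorem skip_map (flag : Int) (l : List (List (String × Int))) :
    skipB (l.map (pvCheck flag)) = pvSkip flag l := by
  induction l with
  | nil => rfl
  | cons f rest ih => simp only [List.map_cons, skipB, pvSkip, ih]

theorem walk_map_bounded (flag : Int) (n : Nat) :
    ∀ (l : List (List (String × Int))), l.length ≤ n →
    ∀ i : Int, walkB i (l.map (pvCheck flag)) = pvWalk flag i l := by
  induction n with
  | zero =>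
    intro l hl i
    rw [List.length_eq_zero_iff.mp (Nat.le_zero.mp hl)]
    rw [List.map_nil, walkB, pvWalk]
  | succ n ih =>
    intro l hl i
    cases l with
    | nil => rw [List.map_nil, walkB, pvWalk]
    | cons f rest =>
      rw [List.map_cons, walkB, pvWalk]
      cases hb : pvCheck flag f
      · exact (by simpa [hb] using ih rest (by simp at hl; omega) (i + 1))
      · have hd : (rest.map (pvCheck flag)).drop (pvSkip flag rest)
            = (rest.drop (pvSkip flag rest)).map (pvCheck flag) := List.map_drop.symm
        have hlen2 : (rest.drop (pvSkip flag rest)).length ≤ n := by simp at hl ⊢; omega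
        simp only [if_true, skip_map, hd]
        exact congrArg _ (ih _ hlen2 _)

theorem walk_map (flag : Int) (l : List (List (String × Int))) :
    ∀ i : Int, walkB i (l.map (pvCheck flag)) = pvWalk flag i l :=
  walk_map_bounded flag l.length l le_rfl

-- after a run start, edgeRef with prev = true just skips the run
theorem edgeRef_true_skip (fl : List Bool) :
    ∀ s : Int, edgeRef s true fl = edgeRef (s + (skipB fl : Int)) false (fl.drop (skipB fl)) := by
  induction fl with
  | nil => intro s; simp [edgeRef]
  | cons c fs ih =>
    intro s
    cases c with
    | false => simp [edgeRef, skipB]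
    | true =>
      have := ih (s + 1)
      simp only [edgeRef, skipB, if_true, Bool.and_false, Bool.not_true] at *
      simpa [add_assoc, add_comm, add_left_comm, Nat.cast_add] using this

-- the boolean walk computes exactly the rising edges
theorem walkB_eq_edgeRef_bounded (n : Nat) :
    ∀ (fl : List Bool), fl.length ≤ n →
    ∀ s : Int, walkB s fl = edgeRef s false fl := by
  induction n with
  | zero =>
    intro fl hl s
    rw [List.length_eq_zero_iff.mp (Nat.le_zero.mp hl)]
    rw [walkB, edgeRef]
  | succ n ih =>
    intro fl hl s
    cases fl with
    | nil => rw [walkB, edgeRef]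
    | cons c fs =>
      rw [walkB, edgeRef]
      cases c with
      | false => simpa using ih fs (by simp at hl; omega) (s + 1)
      | true =>
        have hlen : (fs.drop (skipB fs)).length ≤ fs.length := by simp
        have hlen2 : (fs.drop (skipB fs)).length ≤ n := by simp at hl ⊢; omega
        rw [if_pos rfl, ih _ hlen2 _, ← edgeRef_true_skip fs (s + 1)]
        simp

theorem walkB_eq_edgeRef (fl : List Bool) :
    ∀ s : Int, walkB s fl = edgeRef s false fl :=
  walkB_eq_edgeRef_bounded fl.length fl le_rfl

-- ===== VERDICT (by name: the statement is the Claim_ definition above) =====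
theorem edge_indices_py_spec : Claim_equal_edge_indices_py := by
  intro frames flag _
  show edge_indices_py frames flag = edge_indices_py_alt frames flag
  rw [edge_indices_py, edge_indices_py_alt, foldA_eq, List.nil_append,
    ← walkB_eq_edgeRef, walk_map]
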